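-- pv_equiv track=rewrite | github.com/Naxesss/Aiess | bot/logic.py | deepest_parentheses_range
-- ===== SOURCE A (Python) =====
-- from typing import Union, List, Generator, Tuple, Match
--
-- def parenthesis_equal(string: str) -> bool:
--     """Returns whether this string has an equal amount of opening and closing parentheses."""
--     parentheses = 0
--     for char in string:
--         if char == "(": parentheses += 1
--         if char == ")": parentheses -= 1
--     return parentheses == 0
--
-- def deepest_parentheses_range(string: str) -> Tuple[Union[int, None], Union[int, None]]:
--     """Returns a tuple of the indexes of the first deepest level of opening and closing parenthesis.
--     Raises ValueError on parenthesis inequality."""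
--     if not parenthesis_equal(string):
--         raise ValueError("There are not an equal amount of opening and closing parentheses.")
--
--     depth = 0
--     deepest = 0
--     first_deepest = False
--     deepest_start = None
--     deepest_end = None
--
--     for index, char in enumerate(string):
--         if char == "(":
--             depth += 1
--             if depth > deepest:
--                 deepest = depth
--                 deepest_start = index
--                 first_deepest = True
--         if char == ")":
--             if depth == deepest and first_deepest:
--                 deepest_end = index
--                 first_deepest = False
--             depth -= 1
--
--     return (deepest_start, deepest_end)
-- ===== SOURCE B (Python) =====
-- def deepest_parentheses_range(string):
--     """Returns a tuple of the indexes of the first deepest level of opening and closing parenthesis.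
--     Raises ValueError on parenthesis inequality."""
--     # Pass 1: net parenthesis count and maximum depth ever reached.
--     depth = 0
--     max_depth = 0
--     for char in string:
--         if char == "(":
--             depth += 1
--             if depth > max_depth:
--                 max_depth = depth
--         elif char == ")":
--             depth -= 1
--     if depth != 0:
--         raise ValueError("There are not an equal amount of opening and closing parentheses.")
--     if max_depth == 0:
--         return (None, None)
--     # Pass 2: first "(" whose depth reaches max_depth.
--     depth = 0
--     start = None
--     for i, char in enumerate(string):
--         if char == "(":
--             depth += 1
--             if depth == max_depth:
--                 start = i
--                 break
--         elif char == ")":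
--             depth -= 1
--     # The matching ")" is simply the next ")" (nothing in between may open deeper).
--     end = string.find(")", start + 1)
--     return (start, end if end != -1 else None)
-- ===== Notes on version B (the rewrite author's own statement) =====
-- stated objective: alternative
-- what changed: A's single stateful pass with a first_deepest flag and running-record updates is replaced by a decomposition: one pass computing net count and maximum depth, then a find-first scan (with early break) for the first '(' reaching that depth, then str.find for the next ')'.
import Mathlib
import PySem

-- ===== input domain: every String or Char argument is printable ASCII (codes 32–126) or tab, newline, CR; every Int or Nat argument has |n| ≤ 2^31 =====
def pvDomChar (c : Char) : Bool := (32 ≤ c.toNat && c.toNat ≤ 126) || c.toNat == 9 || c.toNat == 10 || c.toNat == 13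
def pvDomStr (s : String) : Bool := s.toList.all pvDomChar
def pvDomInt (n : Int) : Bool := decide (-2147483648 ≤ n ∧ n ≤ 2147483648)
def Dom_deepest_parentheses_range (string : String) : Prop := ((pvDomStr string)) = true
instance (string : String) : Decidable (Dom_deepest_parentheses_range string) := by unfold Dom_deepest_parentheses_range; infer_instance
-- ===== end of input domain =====

-- B replaces A's single pass with flag/record state by a max-depth pass plus two find-first scans
-- (objective: alternative decomposition, same O(n) cost). A raises ValueError on unequal
-- parenthesis counts; Pre_ excludes exactly those inputs (B raises there too).

-- ===== PORT A =====
-- helper of A: net parenthesis count is zero (two separate ifs, as in the Python)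
def parenthesis_equal (string : String) : Bool :=
  (string.toList.foldl
    (fun p c =>
      let p := if c = '(' then p + 1 else p
      if c = ')' then p - 1 else p) (0 : Int)) = 0

-- A's single loop, state (index, depth, deepest, first_deepest, deepest_start, deepest_end)
def pvLoopA : List Char → Int → Int → Int → Bool → Option Int → Option Int →
    Option Int × Option Int
  | [], _, _, _, _, s, e => (s, e)
  | c :: cs, i, depth, deepest, f, s, e =>
    if c = '(' then
      if depth + 1 > deepest then pvLoopA cs (i + 1) (depth + 1) (depth + 1) true (some i) e
      else pvLoopA cs (i + 1) (depth + 1) deepest f s e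
    else if c = ')' then
      if depth = deepest ∧ f = true then pvLoopA cs (i + 1) (depth - 1) deepest false s (some i)
      else pvLoopA cs (i + 1) (depth - 1) deepest f s e
    else pvLoopA cs (i + 1) depth deepest f s e

def deepest_parentheses_range (string : String) : Option Int × Option Int :=
  if parenthesis_equal string then pvLoopA string.toList 0 0 0 false none none
  else (none, none)  -- Python raises ValueError here; excluded by Pre_

-- ===== PORT B =====
-- B pass 1: (final depth, max depth)
def pvScanB : List Char → Int → Int → Int × Int
  | [], d, m => (d, m)
  | c :: cs, d, m =>
    if c = '(' then pvScanB cs (d + 1) (if d + 1 > m then d + 1 else m)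
    else if c = ')' then pvScanB cs (d - 1) m
    else pvScanB cs d m

-- B pass 2: first '(' whose depth reaches M (the loop with break)
def pvFindStart : List Char → Int → Int → Int → Option Int
  | [], _, _, _ => none
  | c :: cs, i, d, M =>
    if c = '(' then
      if d + 1 = M then some i else pvFindStart cs (i + 1) (d + 1) M
    else if c = ')' then pvFindStart cs (i + 1) (d - 1) M
    else pvFindStart cs (i + 1) d M

-- hand port of string.find(")", lo): first index ≥ lo holding ')'; none = Python's -1,
-- exact for a one-character needle and 0 ≤ lo (a lo past the end yields none, like CPython)
def pvFindClose : List Char → Int → Int → Option Int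
  | [], _, _ => none
  | c :: cs, i, lo => if lo ≤ i ∧ c = ')' then some i else pvFindClose cs (i + 1) lo

def deepest_parentheses_range_alt (string : String) : Option Int × Option Int :=
  let r := pvScanB string.toList 0 0
  if r.1 ≠ 0 then (none, none)  -- Python raises ValueError here; excluded by Pre_
  else if r.2 = 0 then (none, none)
  else
    match pvFindStart string.toList 0 0 r.2 with
    | none => (none, none)  -- unreachable when r.2 > 0 (start is never None in Source B)
    | some s =>
      match pvFindClose string.toList 0 (s + 1) with
      | none => (some s, none)   -- Source B's 'end if end != -1 else None'
      | some e => (some s, some e)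

-- ===== PRECONDITION & SPEC =====
-- Pre_: equally many '(' and ')'; otherwise both A and B raise ValueError.
def Pre_deepest_parentheses_range (string : String) : Prop :=
  string.toList.count '(' = string.toList.count ')'
instance (string : String) : Decidable (Pre_deepest_parentheses_range string) := by
  unfold Pre_deepest_parentheses_range; infer_instance

def pvWitness_deepest_parentheses_range : String := "(a(b)c)"

def Spec_deepest_parentheses_range (string : String) (out : Option Int × Option Int) : Prop := out = deepest_parentheses_range_alt string
instance (string : String) (out : Option Int × Option Int) : Decidable (Spec_deepest_parentheses_range string out) := by unfold Spec_deepest_parentheses_range; infer_instance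

-- ===== CLAIM (what is proved, stated in full; the proofs are below) =====
def Claim_equal_deepest_parentheses_range : Prop := ∀ (string : String), Dom_deepest_parentheses_range string → Pre_deepest_parentheses_range string → Spec_deepest_parentheses_range string (deepest_parentheses_range string)

-- ===== LEMMAS AND PROOFS =====

-- net parenthesis sum of a char list
def pvNet : List Char → Int
  | [] => 0
  | c :: cs => (if c = '(' then 1 else if c = ')' then -1 else 0) + pvNet cs

-- proof-only: first ')' encountered at running depth exactly M
def pvFindCloseAtDepth : List Char → Int → Int → Int → Option Int
  | [], _, _, _ => none
  | c :: cs, i, d, M =>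
    if c = ')' then
      if d = M then some i else pvFindCloseAtDepth cs (i + 1) (d - 1) M
    else if c = '(' then pvFindCloseAtDepth cs (i + 1) (d + 1) M
    else pvFindCloseAtDepth cs (i + 1) d M

-- step lemmas for the recursive helpers
lemma pvNet_open (cs : List Char) : pvNet ('(' :: cs) = 1 + pvNet cs := by simp [pvNet]
lemma pvNet_close (cs : List Char) : pvNet (')' :: cs) = -1 + pvNet cs := by simp [pvNet]
lemma pvNet_other (c : Char) (cs : List Char) (h1 : ¬ c = '(') (h2 : ¬ c = ')') :
    pvNet (c :: cs) = pvNet cs := by simp [pvNet, h1, h2]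

lemma pvScanB_open_rec (cs : List Char) (d m : Int) (h : d + 1 > m) :
    pvScanB ('(' :: cs) d m = pvScanB cs (d + 1) (d + 1) := by simp [pvScanB, h]
lemma pvScanB_open_norec (cs : List Char) (d m : Int) (h : ¬ d + 1 > m) :
    pvScanB ('(' :: cs) d m = pvScanB cs (d + 1) m := by simp [pvScanB, h]
lemma pvScanB_close (cs : List Char) (d m : Int) :
    pvScanB (')' :: cs) d m = pvScanB cs (d - 1) m := by simp [pvScanB]
lemma pvScanB_other (c : Char) (cs : List Char) (d m : Int)
    (h1 : ¬ c = '(') (h2 : ¬ c = ')') :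
    pvScanB (c :: cs) d m = pvScanB cs d m := by simp [pvScanB, h1, h2]

lemma pvLoopA_open_rec (cs : List Char) (i d M : Int) (f : Bool) (s e : Option Int)
    (h : d + 1 > M) :
    pvLoopA ('(' :: cs) i d M f s e = pvLoopA cs (i + 1) (d + 1) (d + 1) true (some i) e := by
  simp [pvLoopA, h]
lemma pvLoopA_open_norec (cs : List Char) (i d M : Int) (f : Bool) (s e : Option Int)
    (h : ¬ d + 1 > M) :
    pvLoopA ('(' :: cs) i d M f s e = pvLoopA cs (i + 1) (d + 1) M f s e := by
  simp [pvLoopA, h]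
lemma pvLoopA_close_hit (cs : List Char) (i d M : Int) (s e : Option Int) (h : d = M) :
    pvLoopA (')' :: cs) i d M true s e = pvLoopA cs (i + 1) (d - 1) M false s (some i) := by
  simp [pvLoopA, h]
lemma pvLoopA_close_miss (cs : List Char) (i d M : Int) (f : Bool) (s e : Option Int)
    (h : ¬ (d = M ∧ f = true)) :
    pvLoopA (')' :: cs) i d M f s e = pvLoopA cs (i + 1) (d - 1) M f s e := by
  simp [pvLoopA, h]
lemma pvLoopA_other (c : Char) (cs : List Char) (i d M : Int) (f : Bool) (s e : Option Int)
    (h1 : ¬ c = '(') (h2 : ¬ c = ')') :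
    pvLoopA (c :: cs) i d M f s e = pvLoopA cs (i + 1) d M f s e := by
  simp [pvLoopA, h1, h2]

lemma pvFindStart_open_miss (cs : List Char) (i d M : Int) (h : ¬ d + 1 = M) :
    pvFindStart ('(' :: cs) i d M = pvFindStart cs (i + 1) (d + 1) M := by
  simp [pvFindStart, h]
lemma pvFindStart_close (cs : List Char) (i d M : Int) :
    pvFindStart (')' :: cs) i d M = pvFindStart cs (i + 1) (d - 1) M := by
  simp [pvFindStart]
lemma pvFindStart_other (c : Char) (cs : List Char) (i d M : Int)
    (h1 : ¬ c = '(') (h2 : ¬ c = ')') :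
    pvFindStart (c :: cs) i d M = pvFindStart cs (i + 1) d M := by
  simp [pvFindStart, h1, h2]

lemma pvFindClose_hit (cs : List Char) (i lo : Int) (h : lo ≤ i) :
    pvFindClose (')' :: cs) i lo = some i := by simp [pvFindClose, h]
lemma pvFindClose_skip (c : Char) (cs : List Char) (i lo : Int) (h : i < lo) :
    pvFindClose (c :: cs) i lo = pvFindClose cs (i + 1) lo := by
  simp only [pvFindClose]
  rw [if_neg (fun hx => absurd hx.1 (by omega))]
lemma pvFindClose_nothit (c : Char) (cs : List Char) (i lo : Int) (h : ¬ c = ')') :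
    pvFindClose (c :: cs) i lo = pvFindClose cs (i + 1) lo := by
  simp [pvFindClose, h]

lemma pvFindCloseAtDepth_hit (cs : List Char) (i d M : Int) (h : d = M) :
    pvFindCloseAtDepth (')' :: cs) i d M = some i := by simp [pvFindCloseAtDepth, h]
lemma pvFindCloseAtDepth_miss (cs : List Char) (i d M : Int) (h : ¬ d = M) :
    pvFindCloseAtDepth (')' :: cs) i d M = pvFindCloseAtDepth cs (i + 1) (d - 1) M := by
  simp [pvFindCloseAtDepth, h]
lemma pvFindCloseAtDepth_open (cs : List Char) (i d M : Int) :
    pvFindCloseAtDepth ('(' :: cs) i d M = pvFindCloseAtDepth cs (i + 1) (d + 1) M := by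
  simp [pvFindCloseAtDepth]
lemma pvFindCloseAtDepth_other (c : Char) (cs : List Char) (i d M : Int)
    (h1 : ¬ c = '(') (h2 : ¬ c = ')') :
    pvFindCloseAtDepth (c :: cs) i d M = pvFindCloseAtDepth cs (i + 1) d M := by
  simp [pvFindCloseAtDepth, h1, h2]

lemma pvScanB_fst (cs : List Char) : ∀ d m : Int, (pvScanB cs d m).1 = d + pvNet cs := by
  induction cs with
  | nil => intro d m; simp [pvScanB, pvNet]
  | cons c cs ih =>
    intro d m
    by_cases hc : c = '('
    · subst hc
      by_cases h : d + 1 > m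
      · rw [pvScanB_open_rec cs d m h, ih, pvNet_open]; ring
      · rw [pvScanB_open_norec cs d m h, ih, pvNet_open]; ring
    · by_cases hc2 : c = ')'
      · subst hc2; rw [pvScanB_close, ih, pvNet_close]; ring
      · rw [pvScanB_other c cs d m hc hc2, ih, pvNet_other c cs hc hc2]

lemma pvScanB_snd_le (cs : List Char) : ∀ d m : Int, m ≤ (pvScanB cs d m).2 := by
  induction cs with
  | nil => intro d m; simp [pvScanB]
  | cons c cs ih =>
    intro d m
    by_cases hc : c = '('
    · subst hc
      by_cases h : d + 1 > m
      · rw [pvScanB_open_rec cs d m h]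
        exact le_trans (by omega) (ih (d + 1) (d + 1))
      · rw [pvScanB_open_norec cs d m h]; exact ih (d + 1) m
    · by_cases hc2 : c = ')'
      · subst hc2; rw [pvScanB_close]; exact ih (d - 1) m
      · rw [pvScanB_other c cs d m hc hc2]; exact ih d m

-- once the scan can no longer deepen but must still descend, the next ')' is at the current depth
lemma pvClose_exists (cs : List Char) : ∀ (i lo d : Int), lo ≤ i →
    (pvScanB cs d d).2 ≤ d → pvNet cs < 0 →
    ∃ j, pvFindCloseAtDepth cs i d d = some j ∧ pvFindClose cs i lo = some j := by
  induction cs with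
  | nil => intro i lo d _ _ hnet; simp [pvNet] at hnet
  | cons c cs ih =>
    intro i lo d hlo hmax hnet
    by_cases hc : c = '('
    · exfalso
      subst hc
      rw [pvScanB_open_rec cs d d (by omega)] at hmax
      have := pvScanB_snd_le cs (d + 1) (d + 1)
      omega
    · by_cases hc2 : c = ')'
      · subst hc2
        exact ⟨i, pvFindCloseAtDepth_hit cs i d d rfl, pvFindClose_hit cs i lo hlo⟩
      · rw [pvScanB_other c cs d d hc hc2] at hmax
        rw [pvNet_other c cs hc hc2] at hnet
        obtain ⟨j, h1, h2⟩ := ih (i + 1) lo d (by omega) hmax hnet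
        exact ⟨j, by rw [pvFindCloseAtDepth_other c cs i d d hc hc2]; exact h1,
               by rw [pvFindClose_nothit c cs i lo hc2]; exact h2⟩

-- the master invariant: A's loop expressed through B's searches
lemma pvLoopA_closed (cs : List Char) : ∀ (i d M : Int) (f : Bool) (s e : Option Int),
    d ≤ M → d + pvNet cs ≤ M →
    (if (pvScanB cs d M).2 > M then
      ∃ j, i ≤ j ∧ pvFindStart cs i d ((pvScanB cs d M).2) = some j ∧
        pvLoopA cs i d M f s e = (some j, pvFindClose cs i (j + 1))
     else pvLoopA cs i d M f s e =
       (s, if f then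
             (match pvFindCloseAtDepth cs i d M with
              | some j => some j
              | none => e)
           else e)) := by
  induction cs with
  | nil =>
    intro i d M f s e _ _
    rw [if_neg (by simp [pvScanB])]
    simp only [pvLoopA, pvFindCloseAtDepth]
    cases f <;> simp
  | cons c cs ih =>
    intro i d M f s e hdM hnet
    by_cases hc : c = '('
    · subst hc
      rw [pvNet_open] at hnet
      by_cases hrec : d + 1 > M
      · -- new record
        rw [pvScanB_open_rec cs d M hrec]
        have hM' : d + 1 ≤ (pvScanB cs (d + 1) (d + 1)).2 := pvScanB_snd_le cs (d + 1) (d + 1)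
        rw [if_pos (by omega)]
        have hloop := pvLoopA_open_rec cs i d M f s e hrec
        have key := ih (i + 1) (d + 1) (d + 1) true (some i) e le_rfl (by omega)
        by_cases hdeep : (pvScanB cs (d + 1) (d + 1)).2 > d + 1
        · -- the record will still be beaten later
          rw [if_pos hdeep] at key
          obtain ⟨j, hij, hfind, hres⟩ := key
          refine ⟨j, by omega, ?_, ?_⟩
          · rw [pvFindStart_open_miss cs i d _ (by omega)]; exact hfind
          · rw [hloop, hres, pvFindClose_skip '(' cs i (j + 1) (by omega)]
        · -- this '(' reaches the final maximum: start = i, end = next ')'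
          have hMeq : (pvScanB cs (d + 1) (d + 1)).2 = d + 1 := by omega
          rw [if_neg hdeep] at key
          refine ⟨i, le_rfl, ?_, ?_⟩
          · simp [pvFindStart, hMeq]
          · obtain ⟨j, hcd, hfc⟩ :=
              pvClose_exists cs (i + 1) (i + 1) (d + 1) le_rfl (by omega) (by omega)
            rw [hloop, key, hcd,
                pvFindClose_skip '(' cs i (i + 1) (by omega), hfc]
            simp
      · -- no record
        rw [pvScanB_open_norec cs d M hrec]
        have hloop := pvLoopA_open_norec cs i d M f s e hrec
        have key := ih (i + 1) (d + 1) M f s e (by omega) (by omega)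
        by_cases hdeep : (pvScanB cs (d + 1) M).2 > M
        · rw [if_pos hdeep] at key ⊢
          obtain ⟨j, hij, hfind, hres⟩ := key
          refine ⟨j, by omega, ?_, ?_⟩
          · rw [pvFindStart_open_miss cs i d _ (by omega)]; exact hfind
          · rw [hloop, hres, pvFindClose_skip '(' cs i (j + 1) (by omega)]
        · rw [if_neg hdeep] at key ⊢
          rw [hloop, key, pvFindCloseAtDepth_open cs i d M]
    · by_cases hc2 : c = ')'
      · subst hc2
        rw [pvNet_close] at hnet
        rw [pvScanB_close cs d M]
        by_cases hset : d = M ∧ f = true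
        · -- A records the close index here
          obtain ⟨hdm, hf⟩ := hset
          subst hf
          have hloop := pvLoopA_close_hit cs i d M s e hdm
          have key := ih (i + 1) (d - 1) M false s (some i) (by omega) (by omega)
          by_cases hdeep : (pvScanB cs (d - 1) M).2 > M
          · rw [if_pos hdeep] at key ⊢
            obtain ⟨j, hij, hfind, hres⟩ := key
            refine ⟨j, by omega, ?_, ?_⟩
            · rw [pvFindStart_close cs i d _]; exact hfind
            · rw [hloop, hres, pvFindClose_skip ')' cs i (j + 1) (by omega)]
          · rw [if_neg hdeep] at key ⊢
            rw [hloop, key, pvFindCloseAtDepth_hit cs i d M hdm]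
            simp
        · have hloop := pvLoopA_close_miss cs i d M f s e hset
          have key := ih (i + 1) (d - 1) M f s e (by omega) (by omega)
          by_cases hdeep : (pvScanB cs (d - 1) M).2 > M
          · rw [if_pos hdeep] at key ⊢
            obtain ⟨j, hij, hfind, hres⟩ := key
            refine ⟨j, by omega, ?_, ?_⟩
            · rw [pvFindStart_close cs i d _]; exact hfind
            · rw [hloop, hres, pvFindClose_skip ')' cs i (j + 1) (by omega)]
          · rw [if_neg hdeep] at key ⊢
            rw [hloop, key]
            cases f with
            | false => rfl
            | true =>
              have hdm : ¬ d = M := fun h => hset ⟨h, rfl⟩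
              rw [pvFindCloseAtDepth_miss cs i d M hdm]
      · -- neutral character
        rw [pvNet_other c cs hc hc2] at hnet
        rw [pvScanB_other c cs d M hc hc2]
        have hloop := pvLoopA_other c cs i d M f s e hc hc2
        have key := ih (i + 1) d M f s e hdM hnet
        by_cases hdeep : (pvScanB cs d M).2 > M
        · rw [if_pos hdeep] at key ⊢
          obtain ⟨j, hij, hfind, hres⟩ := key
          refine ⟨j, by omega, ?_, ?_⟩
          · rw [pvFindStart_other c cs i d _ hc hc2]; exact hfind
          · rw [hloop, hres, pvFindClose_skip c cs i (j + 1) (by omega)]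
        · rw [if_neg hdeep] at key ⊢
          rw [hloop, key, pvFindCloseAtDepth_other c cs i d M hc hc2]

-- A's balance fold is pvNet
lemma pvFoldNet (cs : List Char) : ∀ p : Int,
    (cs.foldl (fun p c =>
      let p := if c = '(' then p + 1 else p
      if c = ')' then p - 1 else p) p) = p + pvNet cs := by
  induction cs with
  | nil => intro p; simp [pvNet]
  | cons c cs ih =>
    intro p
    by_cases hc : c = '('
    · subst hc
      simp [List.foldl, pvNet, ih]
      omega
    · by_cases hc2 : c = ')'
      · subst hc2
        simp [List.foldl, pvNet, ih]
        omega
      · simp [List.foldl, pvNet, hc, hc2, ih]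

-- pvNet is the count difference (Pre_ bridge)
lemma pvNet_count (cs : List Char) :
    pvNet cs = (cs.count '(' : Int) - (cs.count ')' : Int) := by
  induction cs with
  | nil => simp [pvNet]
  | cons c cs ih =>
    by_cases hc : c = '('
    · subst hc; simp [pvNet, ih]; omega
    · by_cases hc2 : c = ')'
      · subst hc2; simp [pvNet, ih]; omega
      · simp [pvNet, hc, hc2, ih]

-- ===== VERDICT (by name: the statement is the Claim_ definition above) =====
theorem deepest_parentheses_range_spec : Claim_equal_deepest_parentheses_range := by
  intro string _ hpre
  unfold Spec_deepest_parentheses_range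
  unfold Pre_deepest_parentheses_range at hpre
  set cs := string.toList with hcs
  have hnet : pvNet cs = 0 := by rw [pvNet_count]; omega
  have hpe : parenthesis_equal string = true := by
    unfold parenthesis_equal
    rw [← hcs, pvFoldNet, hnet]
    simp
  have hA : deepest_parentheses_range string = pvLoopA cs 0 0 0 false none none := by
    unfold deepest_parentheses_range
    rw [hpe, ← hcs]
    simp
  have hscan1 : (pvScanB cs 0 0).1 = 0 := by rw [pvScanB_fst, hnet]; ring
  have hmain := pvLoopA_closed cs 0 0 0 false none none le_rfl (by omega)
  by_cases hdeep : (pvScanB cs 0 0).2 > 0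
  · rw [if_pos hdeep] at hmain
    obtain ⟨j, _, hfind, hres⟩ := hmain
    rw [hA, hres]
    unfold deepest_parentheses_range_alt
    rw [← hcs]
    simp only [hscan1, hfind]
    rw [if_neg (by simp), if_neg (by omega)]
    cases h : pvFindClose cs 0 (j + 1) with
    | none => rfl
    | some v => rfl
  · rw [if_neg hdeep] at hmain
    rw [hA, hmain]
    unfold deepest_parentheses_range_alt
    rw [← hcs]
    have h0 : (pvScanB cs 0 0).2 = 0 := by
      have := pvScanB_snd_le cs 0 0; omega
    simp [hscan1, h0]
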